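-- pv_equiv track=rewrite | github.com/posebear1990/twotwo-girl-danmaku-adventure | tools/extract_hero_frames.py | trim_bbox
-- ===== SOURCE A (Python) =====
-- def trim_bbox(cells: list[list[tuple[int, int, int]]], background: tuple[int, int, int]) -> tuple[list[list[tuple[int, int, int]]], tuple[int, int]]:
--     non_bg = [
--         (x, y)
--         for y, row in enumerate(cells)
--         for x, color in enumerate(row)
--         if color != background
--     ]
--     left = min(x for x, _ in non_bg)
--     right = max(x for x, _ in non_bg)
--     top = min(y for _, y in non_bg)
--     bottom = max(y for _, y in non_bg)
--     cropped = [row[left : right + 1] for row in cells[top : bottom + 1]]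
--     return cropped, (left, top)
-- ===== SOURCE B (Python) =====
-- def trim_bbox(cells: list[list[tuple[int, int, int]]], background: tuple[int, int, int]) -> tuple[list[list[tuple[int, int, int]]], tuple[int, int]]:
--     # Single fused pass: track the running bounding box instead of materialising
--     # the list of all non-background coordinates.
--     bounds = None  # (left, right, top, bottom)
--     for y, row in enumerate(cells):
--         for x, color in enumerate(row):
--             if color != background:
--                 if bounds is None:
--                     bounds = (x, x, y, y)
--                 else:
--                     l, r, t, b = bounds
--                     bounds = (min(l, x), max(r, x), min(t, y), max(b, y))
--     if bounds is None:
--         raise ValueError("no non-background cells")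
--     left, right, top, bottom = bounds
--     cropped = [row[left : right + 1] for row in cells[top : bottom + 1]]
--     return cropped, (left, top)
-- ===== Notes on version B (the rewrite author's own statement) =====
-- stated objective: alternative
-- what changed: Replaces the materialised non-background coordinate list and the four separate min/max passes over it with one fused nested loop maintaining the running (left,right,top,bottom) bounding box.
import Mathlib
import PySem

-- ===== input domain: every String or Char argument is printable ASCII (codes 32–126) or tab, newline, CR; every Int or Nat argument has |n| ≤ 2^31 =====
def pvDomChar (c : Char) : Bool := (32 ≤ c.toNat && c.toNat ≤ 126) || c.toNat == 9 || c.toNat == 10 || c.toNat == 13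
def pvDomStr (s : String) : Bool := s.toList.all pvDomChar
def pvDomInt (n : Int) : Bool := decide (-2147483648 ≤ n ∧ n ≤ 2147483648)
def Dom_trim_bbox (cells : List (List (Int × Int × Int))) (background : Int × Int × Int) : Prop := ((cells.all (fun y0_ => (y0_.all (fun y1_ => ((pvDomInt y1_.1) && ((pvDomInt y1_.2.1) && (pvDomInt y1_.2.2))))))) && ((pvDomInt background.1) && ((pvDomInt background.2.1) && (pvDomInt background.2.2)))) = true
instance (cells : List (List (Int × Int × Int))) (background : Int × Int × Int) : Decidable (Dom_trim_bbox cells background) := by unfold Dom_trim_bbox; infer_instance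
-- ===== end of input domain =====

-- B fuses A's coordinate-list construction and four min/max passes into one nested
-- loop maintaining the running bounding box (alternative decomposition, same cost class).

-- ===== PORT A =====
def trim_bbox (cells : List (List (Int × Int × Int))) (background : Int × Int × Int) : (List (List (Int × Int × Int))) × (Int × Int) :=
  let nonBg : List (Int × Int) :=
    (PySem.List.enumerate cells).flatMap (fun yr =>
      (PySem.List.enumerate yr.2).filterMap (fun xc =>
        if xc.2 ≠ background then some (xc.1, yr.1) else none))
  -- min/max over an empty generator raises ValueError in Python: excluded by Pre_
  let left := (PySem.List.min? (nonBg.map Prod.fst) (fun v => v)).getD 0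
  let right := (PySem.List.max? (nonBg.map Prod.fst) (fun v => v)).getD 0
  let top := (PySem.List.min? (nonBg.map Prod.snd) (fun v => v)).getD 0
  let bottom := (PySem.List.max? (nonBg.map Prod.snd) (fun v => v)).getD 0
  let cropped := (PySem.List.slice cells (some top) (some (bottom + 1))).map
    (fun row => PySem.List.slice row (some left) (some (right + 1)))
  (cropped, (left, top))

-- ===== PORT B =====
def bbUpd (st : Option (Int × Int × Int × Int)) (x y : Int) : Option (Int × Int × Int × Int) :=
  match st with
  | none => some (x, x, y, y)
  | some (l, r, t, b) => some (min l x, max r x, min t y, max b y)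

def trim_bbox_alt (cells : List (List (Int × Int × Int))) (background : Int × Int × Int) : (List (List (Int × Int × Int))) × (Int × Int) :=
  let st := (PySem.List.enumerate cells).foldl (fun st yr =>
      (PySem.List.enumerate yr.2).foldl (fun st xc =>
        if xc.2 ≠ background then bbUpd st xc.1 yr.1 else st) st) none
  match st with
  | none => ([], (0, 0))  -- Source B raises ValueError here: excluded by Pre_
  | some (left, right, top, bottom) =>
    let cropped := (PySem.List.slice cells (some top) (some (bottom + 1))).map
      (fun row => PySem.List.slice row (some left) (some (right + 1)))
    (cropped, (left, top))

-- ===== PRECONDITION & SPEC =====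
-- Pre_ excludes exactly the inputs with no non-background cell, on which A's min()
-- over an empty generator raises ValueError (and B raises ValueError too).
def Pre_trim_bbox (cells : List (List (Int × Int × Int))) (background : Int × Int × Int) : Prop :=
  ∃ row ∈ cells, ∃ c ∈ row, c ≠ background
instance (cells : List (List (Int × Int × Int))) (background : Int × Int × Int) : Decidable (Pre_trim_bbox cells background) := by unfold Pre_trim_bbox; infer_instance

def pvWitness_trim_bbox : (List (List (Int × Int × Int))) × (Int × Int × Int) :=
  ([[(0, 0, 0), (1, 2, 3)], [(0, 0, 0), (0, 0, 0)]], (0, 0, 0))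

def Spec_trim_bbox (cells : List (List (Int × Int × Int))) (background : Int × Int × Int) (out : (List (List (Int × Int × Int))) × (Int × Int)) : Prop := out = trim_bbox_alt cells background
instance (cells : List (List (Int × Int × Int))) (background : Int × Int × Int) (out : (List (List (Int × Int × Int))) × (Int × Int)) : Decidable (Spec_trim_bbox cells background out) := by unfold Spec_trim_bbox; infer_instance

-- ===== CLAIM (what is proved, stated in full; the proofs are below) =====
def Claim_equal_trim_bbox : Prop := ∀ (cells : List (List (Int × Int × Int))) (background : Int × Int × Int), Dom_trim_bbox cells background → Pre_trim_bbox cells background → Spec_trim_bbox cells background (trim_bbox cells background)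

-- ===== LEMMAS AND PROOFS =====

-- B's nested fold equals the fold of bbUpd over A's flat coordinate list.
theorem alt_fold_eq_flat (cells : List (List (Int × Int × Int))) (background : Int × Int × Int) (s0 : Option (Int × Int × Int × Int)) :
    (PySem.List.enumerate cells).foldl (fun st yr =>
      (PySem.List.enumerate yr.2).foldl (fun st xc =>
        if xc.2 ≠ background then bbUpd st xc.1 yr.1 else st) st) s0
    = ((PySem.List.enumerate cells).flatMap (fun yr =>
        (PySem.List.enumerate yr.2).filterMap (fun xc =>
          if xc.2 ≠ background then some (xc.1, yr.1) else none))).foldl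
        (fun st p => bbUpd st p.1 p.2) s0 := by
  rw [List.foldl_flatMap]
  congr 1
  funext st yr
  rw [List.foldl_filterMap]
  congr 1
  funext s xc
  by_cases h : xc.2 ≠ background <;> simp [h]

-- folding bbUpd from a set state accumulates running min/max componentwise.
theorem fold_bbUpd_some (ps : List (Int × Int)) (l r t b : Int) :
    ps.foldl (fun st p => bbUpd st p.1 p.2) (some (l, r, t, b))
    = some ((ps.map Prod.fst).foldl min l, (ps.map Prod.fst).foldl max r,
            (ps.map Prod.snd).foldl min t, (ps.map Prod.snd).foldl max b) := by
  induction ps generalizing l r t b with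
  | nil => rfl
  | cons p ps ih =>
    simp only [List.foldl_cons, List.map_cons, bbUpd]
    exact ih _ _ _ _

theorem nonBg_ne_nil (cells : List (List (Int × Int × Int))) (background : Int × Int × Int)
    (h : Pre_trim_bbox cells background) :
    (PySem.List.enumerate cells).flatMap (fun yr =>
      (PySem.List.enumerate yr.2).filterMap (fun xc =>
        if xc.2 ≠ background then some (xc.1, yr.1) else none)) ≠ [] := by
  obtain ⟨row, hrow, c, hc, hne⟩ := h
  intro hnil
  rw [List.flatMap_eq_nil_iff] at hnil
  obtain ⟨ky, hky, hrw⟩ := List.mem_iff_getElem.mp hrow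
  obtain ⟨kx, hkx, hcw⟩ := List.mem_iff_getElem.mp hc
  have hmemr : ((ky : Int), row) ∈ PySem.List.enumerate cells := by
    rw [PySem.List.mem_enumerate_iff]
    exact ⟨ky, hky, by simp [hrw]⟩
  have := hnil _ hmemr
  rw [List.filterMap_eq_nil_iff] at this
  have hmemc : ((kx : Int), c) ∈ PySem.List.enumerate row := by
    rw [PySem.List.mem_enumerate_iff]
    exact ⟨kx, hkx, by simp [hcw]⟩
  have h2 := this _ hmemc
  simp [hne] at h2

-- ===== VERDICT (by name: the statement is the Claim_ definition above) =====
theorem trim_bbox_spec : Claim_equal_trim_bbox := by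
  unfold Claim_equal_trim_bbox Spec_trim_bbox
  intro cells background _ hpre
  have hne := nonBg_ne_nil cells background hpre
  rcases hnb : (PySem.List.enumerate cells).flatMap (fun yr =>
      (PySem.List.enumerate yr.2).filterMap (fun xc =>
        if xc.2 ≠ background then some (xc.1, yr.1) else none)) with _ | ⟨p, ps⟩
  · exact absurd hnb hne
  · simp only [trim_bbox, trim_bbox_alt]
    rw [alt_fold_eq_flat, hnb, List.foldl_cons,
      show bbUpd none p.1 p.2 = some (p.1, p.1, p.2, p.2) from rfl, fold_bbUpd_some]
    simp only [List.map_cons, PySem.List.min?_id_cons, PySem.List.max?_id_cons,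
      Option.getD_some]
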